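-- pv_equiv track=rewrite | github.com/NioConner/learngit | gxst_crawler_change/utils/js_utils.py | gee_fun_c_run_Qt
-- ===== SOURCE A (Python) =====
-- def gee_fun_c_run_Qt(Qt):
--     g = []
--     e = []
--     f = 0
--     for h in range(len(Qt) - 1):
--         # xpos
--         b = round(Qt[h + 1][0] - Qt[h][0])
--         # ypos
--         c = round(Qt[h + 1][1] - Qt[h][1])
--         # passtime
--         d = round(Qt[h + 1][2] - Qt[h][2])
--         # trace list
--         g.append([b, c, d])
--         if not (b == 0 and c == 0 and d == 0):
--             if b == 0 and c == 0:
--                 f += d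
--             else:
--                 e.append([b, c, d + f])
--                 f = 0
--         else:
--             pass
--     if f != 0:
--         e.append([b, c, f])
--         return e
--     else:
--         return e
-- ===== SOURCE B (Python) =====
-- def gee_fun_c_run_Qt(Qt):
--     # Staged segmentation instead of a streaming carry:
--     # stage 1: raw deltas between consecutive points
--     d = [[round(q[0] - p[0]), round(q[1] - p[1]), round(q[2] - p[2])]
--          for p, q in zip(Qt, Qt[1:])]
--     # stage 2: indices of the deltas that contain actual movement
--     moves = [i for i in range(len(d)) if d[i][0] != 0 or d[i][1] != 0]
--     # stage 3: one output entry per movement; its time is the sum of the delta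
--     # times of its segment (everything since the previous movement, exclusive)
--     bounds = [-1] + moves
--     e = [[d[i][0], d[i][1], sum(d[j][2] for j in range(p + 1, i + 1))]
--          for p, i in zip(bounds, moves)]
--     # trailing dwell time after the last movement
--     tail = sum(d[j][2] for j in range(bounds[-1] + 1, len(d)))
--     if tail != 0:
--         e.append([0, 0, tail])
--     return e
-- ===== Notes on version B (the rewrite author's own statement) =====
-- stated objective: alternative
-- what changed: B replaces A's single streaming loop with a carry by staged segmentation: it first materialises the full delta list, then the list of movement indices, then emits one entry per movement whose time is the segment sum of delta times since the previous movement (zip of boundary indices), with the trailing dwell summed separately; the unused g list is dropped.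
import Mathlib
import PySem

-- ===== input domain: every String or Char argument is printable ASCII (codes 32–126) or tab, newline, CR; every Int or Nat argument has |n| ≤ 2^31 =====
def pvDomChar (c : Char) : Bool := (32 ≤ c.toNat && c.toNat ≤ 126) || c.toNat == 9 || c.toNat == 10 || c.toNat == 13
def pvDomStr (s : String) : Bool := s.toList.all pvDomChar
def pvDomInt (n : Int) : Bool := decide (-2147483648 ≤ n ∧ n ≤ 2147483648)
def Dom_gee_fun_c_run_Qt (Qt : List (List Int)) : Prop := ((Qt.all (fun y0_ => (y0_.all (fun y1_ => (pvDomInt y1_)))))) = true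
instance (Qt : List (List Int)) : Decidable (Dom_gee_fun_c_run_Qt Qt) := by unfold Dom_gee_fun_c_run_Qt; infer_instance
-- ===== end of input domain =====

-- B replaces A's streaming loop with a carry by staged segmentation: it builds the
-- full delta list, then the list of movement indices, then emits one entry per
-- movement whose time is the segment sum of delta times since the previous movement;
-- the unused g list is dropped. Objective: alternative.

-- Qt[j] (getD [] is never used inside Pre_, where indices are in range)
def pvRow (Qt : List (List Int)) (j : Int) : List Int := (PySem.List.pyGet? Qt j).getD []
-- row[j] (getD 0 never used inside Pre_)
def pvAt (r : List Int) (j : Int) : Int := (PySem.List.pyGet? r j).getD 0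

-- ===== PORT A =====
-- loop body of A; state = (g, e, f, b, c); round() on an int difference is the int itself
def geeA_step (Qt : List (List Int))
    (st : List (List Int) × List (List Int) × Int × Int × Int) (h : Int) :
    List (List Int) × List (List Int) × Int × Int × Int :=
  match st with
  | (g, e, f, _, _) =>
    let b := pvAt (pvRow Qt (h+1)) 0 - pvAt (pvRow Qt h) 0
    let c := pvAt (pvRow Qt (h+1)) 1 - pvAt (pvRow Qt h) 1
    let d := pvAt (pvRow Qt (h+1)) 2 - pvAt (pvRow Qt h) 2
    let g' := g ++ [[b, c, d]]
    if ¬(b = 0 ∧ c = 0 ∧ d = 0) then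
      if b = 0 ∧ c = 0 then (g', e, f + d, b, c)
      else (g', e ++ [[b, c, d + f]], 0, b, c)
    else (g', e, f, b, c)

def gee_fun_c_run_Qt (Qt : List (List Int)) : List (List Int) :=
  -- Python's b, c are undefined before the loop runs; they are only read in the final
  -- append, which is unreachable then (f = 0), so the initial 0, 0 are never used.
  match (PySem.List.pyRange 0 ((Qt.length : Int) - 1) 1).foldl (geeA_step Qt) ([], [], 0, 0, 0) with
  | (_, e, f, b, c) => if f ≠ 0 then e ++ [[b, c, f]] else e

-- ===== PORT B =====
-- stage 1: raw deltas between consecutive points (zip(Qt, Qt[1:]))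
def pvDeltas (Qt : List (List Int)) : List (List Int) :=
  (Qt.zip (Qt.drop 1)).map (fun pq =>
    [pvAt pq.2 0 - pvAt pq.1 0, pvAt pq.2 1 - pvAt pq.1 1, pvAt pq.2 2 - pvAt pq.1 2])

-- sum(d[j][2] for j in range(a, b))
def pvSegSum (d : List (List Int)) (a b : Int) : Int :=
  (PySem.List.pyRange a b 1).foldl (fun acc j => acc + pvAt (pvRow d j) 2) 0

def gee_fun_c_run_Qt_alt (Qt : List (List Int)) : List (List Int) :=
  let d := pvDeltas Qt
  -- stage 2: indices of the deltas that contain actual movement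
  let moves := (PySem.List.pyRange 0 (d.length : Int) 1).filter
    (fun i => decide (pvAt (pvRow d i) 0 ≠ 0) || decide (pvAt (pvRow d i) 1 ≠ 0))
  -- stage 3: one entry per movement, with the segment sum of delta times
  let bounds := (-1 : Int) :: moves
  let e := (bounds.zip moves).map (fun pi =>
    [pvAt (pvRow d pi.2) 0, pvAt (pvRow d pi.2) 1, pvSegSum d (pi.1 + 1) (pi.2 + 1)])
  -- trailing dwell time after the last movement
  let tail := pvSegSum d ((PySem.List.pyGet? bounds (-1)).getD 0 + 1) (d.length : Int)
  if tail ≠ 0 then e ++ [[0, 0, tail]] else e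

-- ===== PRECONDITION & SPEC =====
-- Pre_ excludes exactly the inputs where Python A raises IndexError: a list of two or
-- more points containing a row with fewer than three entries (every row is accessed).
def Pre_gee_fun_c_run_Qt (Qt : List (List Int)) : Prop :=
  Qt.length ≤ 1 ∨ ∀ l ∈ Qt, 3 ≤ l.length
instance (Qt : List (List Int)) : Decidable (Pre_gee_fun_c_run_Qt Qt) := by
  unfold Pre_gee_fun_c_run_Qt; infer_instance
def pvWitness_gee_fun_c_run_Qt : List (List Int) := [[0, 0, 0], [1, 2, 3]]

def Spec_gee_fun_c_run_Qt (Qt : List (List Int)) (out : List (List Int)) : Prop := out = gee_fun_c_run_Qt_alt Qt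
instance (Qt : List (List Int)) (out : List (List Int)) : Decidable (Spec_gee_fun_c_run_Qt Qt out) := by unfold Spec_gee_fun_c_run_Qt; infer_instance

-- ===== CLAIM (what is proved, stated in full; the proofs are below) =====
def Claim_equal_gee_fun_c_run_Qt : Prop := ∀ (Qt : List (List Int)), Dom_gee_fun_c_run_Qt Qt → Pre_gee_fun_c_run_Qt Qt → Spec_gee_fun_c_run_Qt Qt (gee_fun_c_run_Qt Qt)

-- ===== LEMMAS AND PROOFS =====

-- timestamp of point j (shorthand used only by the proofs)
def pvT (Qt : List (List Int)) (j : Int) : Int := pvAt (pvRow Qt j) 2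

-- proof-side middle form C: the prev-index single pass both programs are reduced to
def geeC_step (Qt : List (List Int)) (st : List (List Int) × Int) (i : Int) :
    List (List Int) × Int :=
  match st with
  | (e, prev) =>
    let b := pvAt (pvRow Qt (i+1)) 0 - pvAt (pvRow Qt i) 0
    let c := pvAt (pvRow Qt (i+1)) 1 - pvAt (pvRow Qt i) 1
    if b ≠ 0 ∨ c ≠ 0 then
      (e ++ [[b, c, pvAt (pvRow Qt (i+1)) 2 - pvAt (pvRow Qt prev) 2]], i + 1)
    else (e, prev)

def geeC_run (Qt : List (List Int)) : List (List Int) :=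
  match (PySem.List.pyRange 0 ((Qt.length : Int) - 1) 1).foldl (geeC_step Qt) ([], 0) with
  | (e, prev) =>
    if 2 ≤ Qt.length then
      let tail := pvAt (pvRow Qt (-1)) 2 - pvAt (pvRow Qt prev) 2
      if tail ≠ 0 then e ++ [[0, 0, tail]] else e
    else e

-- A's carry f always equals the timestamp span since C's last emitted index, and when
-- f ≠ 0 the last stored (b, c) are (0, 0); both folds keep the same emitted list e.
theorem gee_inv (Qt : List (List Int)) :
    ∀ (m : Nat) (k : Int) (g e : List (List Int)) (f b c prev : Int),
      f = pvT Qt k - pvT Qt prev → (f ≠ 0 → b = 0 ∧ c = 0) →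
      ∃ g' e' f' b' c' prev',
        (PySem.List.pyRange k (k + (m : Int)) 1).foldl (geeA_step Qt) (g, e, f, b, c)
          = (g', e', f', b', c') ∧
        (PySem.List.pyRange k (k + (m : Int)) 1).foldl (geeC_step Qt) (e, prev)
          = (e', prev') ∧
        f' = pvT Qt (k + (m : Int)) - pvT Qt prev' ∧
        (f' ≠ 0 → b' = 0 ∧ c' = 0) := by
  intro m
  induction m with
  | zero =>
    intro k g e f b c prev hf hbc
    rw [show k + ((0 : Nat) : Int) = k by omega, PySem.List.pyRange_one_eq_nil (le_refl k)]
    exact ⟨g, e, f, b, c, prev, rfl, rfl, by simpa using hf, hbc⟩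
  | succ m ih =>
    intro k g e f b c prev hf hbc
    rw [PySem.List.pyRange_one_cons (by push_cast; omega : k < k + ((m + 1 : Nat) : Int))]
    simp only [List.foldl_cons]
    set b1 := pvAt (pvRow Qt (k+1)) 0 - pvAt (pvRow Qt k) 0 with hb1
    set c1 := pvAt (pvRow Qt (k+1)) 1 - pvAt (pvRow Qt k) 1 with hc1
    have hd1 : pvAt (pvRow Qt (k+1)) 2 - pvAt (pvRow Qt k) 2 = pvT Qt (k+1) - pvT Qt k := rfl
    have harith : ∀ r, (pvT Qt (k+1) - pvT Qt k) + (pvT Qt k - pvT Qt r) = pvT Qt (k+1) - pvT Qt r := by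
      intro r; ring
    by_cases hz : b1 = 0 ∧ c1 = 0
    · -- C does not emit; A either skips or accumulates d into f
      have hCs : geeC_step Qt (e, prev) k = (e, prev) := by
        simp [geeC_step, ← hb1, ← hc1, hz.1, hz.2]
      by_cases hd0 : pvAt (pvRow Qt (k+1)) 2 - pvAt (pvRow Qt k) 2 = 0
      · have hAs : geeA_step Qt (g, e, f, b, c) k
            = (g ++ [[b1, c1, pvAt (pvRow Qt (k+1)) 2 - pvAt (pvRow Qt k) 2]], e, f, b1, c1) := by
          simp [geeA_step, ← hb1, ← hc1, hz.1, hz.2, hd0]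
        rw [hAs, hCs, show k + ((m + 1 : Nat) : Int) = (k + 1) + (m : Int) by push_cast; omega]
        exact ih (k+1) _ e f b1 c1 prev
          (by rw [hf, ← harith prev, hd1] at *; omega)
          (fun _ => ⟨hz.1, hz.2⟩)
      · have hAs : geeA_step Qt (g, e, f, b, c) k
            = (g ++ [[b1, c1, pvAt (pvRow Qt (k+1)) 2 - pvAt (pvRow Qt k) 2]], e,
               f + (pvAt (pvRow Qt (k+1)) 2 - pvAt (pvRow Qt k) 2), b1, c1) := by
          simp [geeA_step, ← hb1, ← hc1, hz.1, hz.2, hd0]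
        rw [hAs, hCs, show k + ((m + 1 : Nat) : Int) = (k + 1) + (m : Int) by push_cast; omega]
        exact ih (k+1) _ e _ b1 c1 prev
          (by rw [hf, hd1]; ring)
          (fun _ => ⟨hz.1, hz.2⟩)
    · -- both emit, and A's d + f telescopes to C's timestamp difference
      have hor : b1 ≠ 0 ∨ c1 ≠ 0 := by tauto
      have hAs : geeA_step Qt (g, e, f, b, c) k
          = (g ++ [[b1, c1, pvAt (pvRow Qt (k+1)) 2 - pvAt (pvRow Qt k) 2]],
             e ++ [[b1, c1, (pvAt (pvRow Qt (k+1)) 2 - pvAt (pvRow Qt k) 2) + f]], 0, b1, c1) := by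
        simp [geeA_step, ← hb1, ← hc1]
        rw [if_pos (fun h1 h2 => absurd (And.intro h1 h2) hz), if_neg hz]
      have hCs : geeC_step Qt (e, prev) k
          = (e ++ [[b1, c1, pvAt (pvRow Qt (k+1)) 2 - pvAt (pvRow Qt prev) 2]], k + 1) := by
        simp [geeC_step, ← hb1, ← hc1, hor]
      have hsame : (pvAt (pvRow Qt (k+1)) 2 - pvAt (pvRow Qt k) 2) + f
          = pvAt (pvRow Qt (k+1)) 2 - pvAt (pvRow Qt prev) 2 := by
        rw [hf]; show pvT Qt (k+1) - pvT Qt k + (pvT Qt k - pvT Qt prev) = pvT Qt (k+1) - pvT Qt prev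
        ring
      rw [hAs, hCs, hsame, show k + ((m + 1 : Nat) : Int) = (k + 1) + (m : Int) by push_cast; omega]
      exact ih (k+1) _ _ 0 b1 c1 (k+1) (by show (0:Int) = pvT Qt (k+1) - pvT Qt (k+1); ring)
        (fun h => absurd rfl h)

-- Qt[-1] is Qt[len-1] on a nonempty list
theorem pvRow_neg_one (Qt : List (List Int)) (h : Qt ≠ []) :
    pvRow Qt (-1) = pvRow Qt ((Qt.length : Int) - 1) := by
  have hl : 0 < Qt.length := List.length_pos_iff.mpr h
  simp [pvRow, PySem.List.pyGet?, PySem.List.pyIdx?]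
  have hl1 : 1 ≤ Qt.length := hl
  rw [if_pos hl1, if_pos hl1]

-- A = C, exactly the old single-pass equivalence
theorem gee_A_eq_C (Qt : List (List Int)) : gee_fun_c_run_Qt Qt = geeC_run Qt := by
  by_cases hn : Qt.length ≤ 1
  · have hnil : PySem.List.pyRange 0 ((Qt.length : Int) - 1) 1 = [] :=
      PySem.List.pyRange_one_eq_nil (by omega)
    simp [gee_fun_c_run_Qt, geeC_run, hnil, show ¬ (2 ≤ Qt.length) by omega]
  · have hn2 : 2 ≤ Qt.length := by omega
    have hm : (Qt.length : Int) - 1 = 0 + ((Qt.length - 1 : Nat) : Int) := by omega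
    obtain ⟨g', e', f', b', c', prev', hA, hC, hfinv, hbc⟩ :=
      gee_inv Qt (Qt.length - 1) 0 [] [] 0 0 0 0 (by ring) (fun h => absurd rfl h)
    have hTlast : pvT Qt (0 + ((Qt.length - 1 : Nat) : Int)) = pvAt (pvRow Qt (-1)) 2 := by
      rw [pvRow_neg_one Qt (by intro h; rw [h] at hn; simp at hn)]
      show pvAt (pvRow Qt (0 + ((Qt.length - 1 : Nat) : Int))) 2 = _
      congr 2
      omega
    unfold gee_fun_c_run_Qt geeC_run
    rw [hm, hA, hC]
    dsimp only
    have htail : pvAt (pvRow Qt (-1)) 2 - pvAt (pvRow Qt prev') 2 = f' := by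
      rw [hfinv, hTlast]; rfl
    rw [if_pos hn2, htail]
    by_cases hf0 : f' = 0
    · simp [hf0]
    · obtain ⟨hb0, hc0⟩ := hbc hf0
      simp [hf0, hb0, hc0]

-- the k-th delta row, spelled out (k in range)
theorem deltas_get (Qt : List (List Int)) (k : Nat) (hk : k < (pvDeltas Qt).length) :
    pvRow (pvDeltas Qt) (k : Int) =
      [pvAt (pvRow Qt ((k : Int) + 1)) 0 - pvAt (pvRow Qt (k : Int)) 0,
       pvAt (pvRow Qt ((k : Int) + 1)) 1 - pvAt (pvRow Qt (k : Int)) 1,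
       pvAt (pvRow Qt ((k : Int) + 1)) 2 - pvAt (pvRow Qt (k : Int)) 2] := by
  have hlen : (pvDeltas Qt).length = min Qt.length (Qt.length - 1) := by
    simp [pvDeltas]
  have hk1 : k + 1 < Qt.length := by omega
  have hkq : k < Qt.length := by omega
  have hz : (Qt.zip (Qt.drop 1)).length = min Qt.length (Qt.length - 1) := by simp
  have hkz : k < (Qt.zip (Qt.drop 1)).length := by omega
  have hrow : pvRow (pvDeltas Qt) (k : Int) = (pvDeltas Qt)[k] := by
    simp [pvRow, PySem.List.pyGet?_natCast, List.getElem?_eq_getElem hk]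
  rw [hrow]
  have : (pvDeltas Qt)[k] = (fun pq : List Int × List Int =>
      [pvAt pq.2 0 - pvAt pq.1 0, pvAt pq.2 1 - pvAt pq.1 1, pvAt pq.2 2 - pvAt pq.1 2])
      ((Qt.zip (Qt.drop 1))[k]'hkz) := by
    simp [pvDeltas]
  rw [this, List.getElem_zip]
  have hd : (Qt.drop 1)[k]'(by simpa using by omega) = Qt[k+1]'hk1 := by
    simp
  have hq0 : pvRow Qt (k : Int) = Qt[k] := by
    simp [pvRow, PySem.List.pyGet?_natCast, List.getElem?_eq_getElem hkq]
  have hq1 : pvRow Qt ((k : Int) + 1) = Qt[k+1] := by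
    rw [pvRow, show ((k : Int) + 1) = ((k + 1 : Nat) : Int) from by push_cast; ring,
      PySem.List.pyGet?_natCast, List.getElem?_eq_getElem hk1]
    rfl
  simp [hq0, hq1]

-- Int-index version
theorem deltas_get' (Qt : List (List Int)) (i : Int) (h0 : 0 ≤ i)
    (h1 : i < ((pvDeltas Qt).length : Int)) :
    pvRow (pvDeltas Qt) i =
      [pvAt (pvRow Qt (i + 1)) 0 - pvAt (pvRow Qt i) 0,
       pvAt (pvRow Qt (i + 1)) 1 - pvAt (pvRow Qt i) 1,
       pvAt (pvRow Qt (i + 1)) 2 - pvAt (pvRow Qt i) 2] := by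
  have hi : i = ((i.toNat : Nat) : Int) := by omega
  rw [hi]
  exact deltas_get Qt i.toNat (by omega)

-- third component of a delta row is the timestamp difference
theorem deltas_time (Qt : List (List Int)) (i : Int) (h0 : 0 ≤ i)
    (h1 : i < ((pvDeltas Qt).length : Int)) :
    pvAt (pvRow (pvDeltas Qt) i) 2 = pvT Qt (i + 1) - pvT Qt i := by
  rw [deltas_get' Qt i h0 h1]
  rfl

-- segment sums of delta times telescope to timestamp differences
theorem segsum_aux (Qt : List (List Int)) :
    ∀ (m : Nat) (a : Int), 0 ≤ a → a + (m : Int) ≤ ((pvDeltas Qt).length : Int) →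
    ∀ init, (PySem.List.pyRange a (a + (m : Int)) 1).foldl
        (fun acc j => acc + pvAt (pvRow (pvDeltas Qt) j) 2) init
      = init + (pvT Qt (a + (m : Int)) - pvT Qt a) := by
  intro m
  induction m with
  | zero =>
    intro a h0 hub init
    rw [show a + ((0 : Nat) : Int) = a by omega, PySem.List.pyRange_one_eq_nil (le_refl a)]
    simp
  | succ m ih =>
    intro a h0 hub init
    rw [PySem.List.pyRange_one_cons (by push_cast; omega : a < a + ((m + 1 : Nat) : Int))]
    simp only [List.foldl_cons]
    rw [show a + ((m + 1 : Nat) : Int) = (a + 1) + (m : Int) by push_cast; ring]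
    rw [ih (a + 1) (by omega) (by push_cast at hub ⊢; omega) _]
    rw [deltas_time Qt a h0 (by push_cast at hub ⊢; omega)]
    ring

theorem segsum_eq (Qt : List (List Int)) (a b : Int) (h0 : 0 ≤ a) (hab : a ≤ b)
    (hub : b ≤ ((pvDeltas Qt).length : Int)) :
    pvSegSum (pvDeltas Qt) a b = pvT Qt b - pvT Qt a := by
  have hb : b = a + (((b - a).toNat : Nat) : Int) := by omega
  rw [pvSegSum, hb, segsum_aux Qt (b - a).toNat a h0 (by omega) 0]
  simp

-- the emitted list, as a recursion over the movement indices
def pvEmit (Qt : List (List Int)) : Int → List Int → List (List Int)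
  | _, [] => []
  | prev, i :: rest =>
      [pvAt (pvRow Qt (i+1)) 0 - pvAt (pvRow Qt i) 0,
       pvAt (pvRow Qt (i+1)) 1 - pvAt (pvRow Qt i) 1,
       pvT Qt (i+1) - pvT Qt prev] :: pvEmit Qt (i+1) rest

def pvIsMove (Qt : List (List Int)) (i : Int) : Bool :=
  decide (pvAt (pvRow Qt (i+1)) 0 - pvAt (pvRow Qt i) 0 ≠ 0)
    || decide (pvAt (pvRow Qt (i+1)) 1 - pvAt (pvRow Qt i) 1 ≠ 0)

-- C's fold, characterised by the movement indices it passes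
theorem geeC_char (Qt : List (List Int)) :
    ∀ (l : List Int) (e : List (List Int)) (prev : Int),
      l.foldl (geeC_step Qt) (e, prev)
        = (e ++ pvEmit Qt prev (l.filter (pvIsMove Qt)),
           (l.filter (pvIsMove Qt)).foldl (fun _ i => i + 1) prev) := by
  intro l
  induction l with
  | nil => intro e prev; simp [pvEmit]
  | cons i l ih =>
    intro e prev
    simp only [List.foldl_cons]
    by_cases hm : pvIsMove Qt i = true
    · have hor : pvAt (pvRow Qt (i+1)) 0 - pvAt (pvRow Qt i) 0 ≠ 0
          ∨ pvAt (pvRow Qt (i+1)) 1 - pvAt (pvRow Qt i) 1 ≠ 0 := by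
        simpa [pvIsMove] using hm
      have hs : geeC_step Qt (e, prev) i
          = (e ++ [[pvAt (pvRow Qt (i+1)) 0 - pvAt (pvRow Qt i) 0,
                    pvAt (pvRow Qt (i+1)) 1 - pvAt (pvRow Qt i) 1,
                    pvAt (pvRow Qt (i+1)) 2 - pvAt (pvRow Qt prev) 2]], i + 1) := by
        simp [geeC_step, hor]
      rw [hs, ih, List.filter_cons_of_pos hm]
      simp [pvEmit, pvT]
    · have hand : pvAt (pvRow Qt (i+1)) 0 - pvAt (pvRow Qt i) 0 = 0
          ∧ pvAt (pvRow Qt (i+1)) 1 - pvAt (pvRow Qt i) 1 = 0 := by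
        simpa [pvIsMove] using hm
      have hs : geeC_step Qt (e, prev) i = (e, prev) := by
        simp [geeC_step, hand.1, hand.2]
      rw [hs, ih, List.filter_cons_of_neg (by simpa using hm)]

-- B's zipped comprehension is the same recursion over the movement indices
theorem zip_emit (Qt : List (List Int)) :
    ∀ (moves : List Int) (p0 : Int), (-1 : Int) ≤ p0 →
      (∀ i ∈ moves, p0 < i ∧ i < ((pvDeltas Qt).length : Int)) →
      moves.Pairwise (· < ·) →
      ((p0 :: moves).zip moves).map (fun pi =>
          [pvAt (pvRow (pvDeltas Qt) pi.2) 0, pvAt (pvRow (pvDeltas Qt) pi.2) 1,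
           pvSegSum (pvDeltas Qt) (pi.1 + 1) (pi.2 + 1)])
        = pvEmit Qt (p0 + 1) moves := by
  intro moves
  induction moves with
  | nil => intro p0 _ _ _; simp [pvEmit]
  | cons i rest ih =>
    intro p0 hp0 hmem hpw
    obtain ⟨hpi, hilen⟩ := hmem i (by simp)
    have hi0 : 0 ≤ i := by omega
    have hrow := deltas_get' Qt i hi0 hilen
    have hseg : pvSegSum (pvDeltas Qt) (p0 + 1) (i + 1) = pvT Qt (i + 1) - pvT Qt (p0 + 1) :=
      segsum_eq Qt (p0 + 1) (i + 1) (by omega) (by omega) (by omega)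
    simp only [List.zip_cons_cons, List.map_cons, pvEmit]
    congr 1
    · rw [hrow, hseg]
      rfl
    · exact ih i (by omega)
        (fun j hj => ⟨(List.pairwise_cons.mp hpw).1 j hj, (hmem j (by simp [hj])).2⟩)
        (List.pairwise_cons.mp hpw).2

-- folding (fun _ i => i+1) just takes the last element + 1
theorem foldl_last (l : List Int) (prev : Int) :
    l.foldl (fun _ i => i + 1) prev = (match l.getLast? with | none => prev | some x => x + 1) := by
  induction l generalizing prev with
  | nil => simp
  | cons x l ih =>
    cases l with
    | nil => simp
    | cons y l => simpa using ih y

-- C = B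
theorem gee_C_eq_B (Qt : List (List Int)) : geeC_run Qt = gee_fun_c_run_Qt_alt Qt := by
  by_cases hn : Qt.length ≤ 1
  · have hd : pvDeltas Qt = [] := by
      have : Qt.drop 1 = [] := by
        cases Qt with
        | nil => simp
        | cons x l => simp at hn ⊢; omega
      simp [pvDeltas, this]
    have hnil : PySem.List.pyRange 0 ((Qt.length : Int) - 1) 1 = [] :=
      PySem.List.pyRange_one_eq_nil (by omega)
    simp [geeC_run, gee_fun_c_run_Qt_alt, hd, hnil, pvSegSum,
      PySem.List.pyRange_one_eq_nil (le_refl (0:Int)),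
      show ¬ (2 ≤ Qt.length) by omega, PySem.List.pyGet?]
    decide
  · have hn2 : 2 ≤ Qt.length := by omega
    have hdl : (pvDeltas Qt).length = Qt.length - 1 := by
      simp [pvDeltas]
    have hcast : ((pvDeltas Qt).length : Int) = (Qt.length : Int) - 1 := by
      rw [hdl]; omega
    -- both filters agree on the range
    have hfeq : ((PySem.List.pyRange 0 ((pvDeltas Qt).length : Int) 1).filter
        (fun i => decide (pvAt (pvRow (pvDeltas Qt) i) 0 ≠ 0)
          || decide (pvAt (pvRow (pvDeltas Qt) i) 1 ≠ 0)))
        = (PySem.List.pyRange 0 ((Qt.length : Int) - 1) 1).filter (pvIsMove Qt) := by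
      rw [hcast]
      apply List.filter_congr
      intro i hi
      have hr := (PySem.List.mem_pyRange_one).mp hi
      rw [deltas_get' Qt i hr.1 (by omega)]
      rfl
    set M := (PySem.List.pyRange 0 ((Qt.length : Int) - 1) 1).filter (pvIsMove Qt) with hM
    have hMmem : ∀ i ∈ M, (0 : Int) ≤ i ∧ i < ((pvDeltas Qt).length : Int) := by
      intro i hi
      have := (PySem.List.mem_pyRange_one).mp (List.mem_of_mem_filter hi)
      omega
    have hMpw : M.Pairwise (· < ·) :=
      (PySem.List.pairwise_lt_pyRange_one 0 ((Qt.length : Int) - 1)).sublist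
        List.filter_sublist
    -- C side
    unfold geeC_run
    rw [geeC_char Qt _ [] 0]
    dsimp only
    rw [if_pos hn2, ← hM]
    -- B side
    unfold gee_fun_c_run_Qt_alt
    dsimp only
    rw [hfeq]
    have hemit : ((((-1 : Int) :: M).zip M).map (fun pi =>
        [pvAt (pvRow (pvDeltas Qt) pi.2) 0, pvAt (pvRow (pvDeltas Qt) pi.2) 1,
         pvSegSum (pvDeltas Qt) (pi.1 + 1) (pi.2 + 1)]))
        = pvEmit Qt 0 M := by
      have := zip_emit Qt M (-1) (le_refl _)
        (fun i hi => ⟨by have := hMmem i hi; omega, (hMmem i hi).2⟩) hMpw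
      simpa using this
    rw [hemit]
    -- the trailing dwell of both sides is the same value
    have hlastprev : M.foldl (fun _ i => i + 1) 0
        = (PySem.List.pyGet? ((-1 : Int) :: M) (-1)).getD 0 + 1 := by
      rw [foldl_last, PySem.List.pyGet?_neg_one]
      cases hML : M.getLast? with
      | none =>
        have : M = [] := by simpa using hML
        simp [this]
      | some x =>
        simp [List.getLast?_cons, hML]
    set p := (PySem.List.pyGet? ((-1 : Int) :: M) (-1)).getD 0 with hp
    have hpbounds : (0 : Int) ≤ p + 1 ∧ p + 1 ≤ ((pvDeltas Qt).length : Int) := by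
      rw [hp, PySem.List.pyGet?_neg_one]
      cases hML : M.getLast? with
      | none => simp [List.getLast?_cons, hML]
      | some x =>
        have hx : x ∈ M := List.mem_of_getLast? hML
        have := hMmem x hx
        simp [List.getLast?_cons, hML]
        omega
    have htailB : pvSegSum (pvDeltas Qt) (p + 1) ((pvDeltas Qt).length : Int)
        = pvAt (pvRow Qt (-1)) 2 - pvAt (pvRow Qt (p + 1)) 2 := by
      rw [segsum_eq Qt (p + 1) _ hpbounds.1 hpbounds.2 (le_refl _)]
      rw [pvRow_neg_one Qt (by intro h; rw [h] at hn2; simp at hn2)]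
      rw [hcast]
      rfl
    rw [hlastprev, htailB]
    simp

-- ===== VERDICT (by name: the statement is the Claim_ definition above) =====
theorem gee_fun_c_run_Qt_spec : Claim_equal_gee_fun_c_run_Qt := by
  intro Qt _ _
  unfold Spec_gee_fun_c_run_Qt
  rw [gee_A_eq_C, gee_C_eq_B]
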